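-- pv_equiv track=rewrite | github.com/saivamsi511/python_pratice | stones.py | get_unique_stones_to_bring
-- ===== SOURCE A (Python) =====
-- def get_unique_stones_to_bring(M,N,common_stones):
--     mars_weight = list(range(1,M+1))
--     earth_weights = common_stones
--     mars_set = set(mars_weight)
--     earth_set = set(earth_weights)
--     unique_mars_weights = list(mars_set -earth_set)
--     unique_mars_weights.sort()
--     total_weight = 0
--     num_stones_selected = 0
--     for weights in unique_mars_weights:
--         if total_weight + weights <= M:
--             total_weight +=weights
--             num_stones_selected +=1
--         else:
--             break
--     return num_stones_selected
-- ===== SOURCE B (Python) =====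
-- def get_unique_stones_to_bring(M, N, common_stones):
--     # Block-arithmetic algorithm: instead of walking weights 1,2,3,... one by one,
--     # sort the distinct in-range common stones and treat the gaps between them as
--     # arithmetic runs a, a+1, ..., c-1.  For each run, the number of stones that
--     # still fits in the remaining budget is found by binary search on the closed
--     # form t*a + t*(t-1)//2 (sum of t consecutive weights starting at a), so the
--     # work is O(C log C + C log M) for C common stones, independent of M.
--     cs = sorted(set(c for c in common_stones if 1 <= c <= M))
--     total = 0
--     count = 0
--     prev = 0
--     for c in cs + [M + 1]:
--         a = prev + 1
--         length = c - a          # the run is a, a+1, ..., c-1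
--         if length > 0:
--             budget = M - total
--             lo, hi = 0, length  # largest t <= length with t*a + t*(t-1)//2 <= budget
--             while lo < hi:
--                 mid = (lo + hi + 1) // 2
--                 if mid * a + mid * (mid - 1) // 2 <= budget:
--                     lo = mid
--                 else:
--                     hi = mid - 1
--             total += lo * a + lo * (lo - 1) // 2
--             count += lo
--             if lo < length:
--                 return count
--         prev = c
--     return count
-- ===== Notes on version B (the rewrite author's own statement) =====
-- stated objective: faster
-- what changed: Instead of building range(1,M+1), set-differencing, sorting and scanning weight by weight, B sorts only the distinct in-range common stones and processes each gap between them as an arithmetic run, finding the admissible prefix length of the run by binary search on the closed-form sum t*a + t*(t-1)//2.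
import Mathlib
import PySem

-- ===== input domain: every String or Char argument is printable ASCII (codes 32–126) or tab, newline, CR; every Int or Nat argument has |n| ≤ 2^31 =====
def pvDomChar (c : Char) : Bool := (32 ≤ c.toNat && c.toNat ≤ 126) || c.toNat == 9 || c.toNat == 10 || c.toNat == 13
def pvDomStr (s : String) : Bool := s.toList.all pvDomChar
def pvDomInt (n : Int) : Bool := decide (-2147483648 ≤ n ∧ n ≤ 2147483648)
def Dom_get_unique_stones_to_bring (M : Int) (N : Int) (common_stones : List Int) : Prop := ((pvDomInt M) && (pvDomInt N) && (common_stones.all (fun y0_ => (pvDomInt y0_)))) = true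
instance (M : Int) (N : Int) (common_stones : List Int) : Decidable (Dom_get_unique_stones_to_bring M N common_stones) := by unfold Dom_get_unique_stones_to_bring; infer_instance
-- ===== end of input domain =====

-- B replaces A's build-range / set-difference / sort / element-by-element greedy scan with
-- block arithmetic over the gaps between the sorted common stones: each gap is an arithmetic
-- run whose admissible prefix length is found by binary search on a closed-form sum.

-- ===== PORT A =====
-- A's for-loop with break over the sorted unique weights
def pvALoop (M : Int) : List Int → Int → Int → Int
  | [], _total, count => count
  | w :: rest, total, count =>
    if total + w ≤ M then pvALoop M rest (total + w) (count + 1)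
    else count

def get_unique_stones_to_bring (M : Int) (N : Int) (common_stones : List Int) : Int :=
  let mars_weight := PySem.List.pyRange 1 (M + 1)
  let earth_weights := common_stones
  -- set(mars_weight): mars_weight is duplicate-free (PySem.List.nodup_pyRange_one), so the set
  -- holds exactly this list — kept as the list so the port evaluates linearly; exact
  let mars_set : PySem.Set Int := mars_weight
  let earth_set := PySem.Set.ofList earth_weights
  -- list(mars_set - earth_set) followed by .sort(): set difference then ascending sort
  -- .sort() on a list of ints = ascending stable sort; List.mergeSort is exact for it
  let unique_mars_weights := (PySem.Set.diff mars_set earth_set).mergeSort (fun a b => decide (a ≤ b))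
  pvALoop M unique_mars_weights 0 0

-- ===== PORT B =====
-- mid*a + mid*(mid-1)//2  : sum of the t consecutive weights a, a+1, ..., a+t-1
def pvCost (a t : Int) : Int := t * a + PySem.Int.floordiv (t * (t - 1)) 2

-- B's inner while-loop: largest t in [lo, hi] with pvCost a t ≤ budget (binary search)
def pvBSearch (a budget lo hi : Int) : Int :=
  if _h : lo < hi then
    let mid := PySem.Int.floordiv (lo + hi + 1) 2
    if pvCost a mid ≤ budget then pvBSearch a budget mid hi
    else pvBSearch a budget lo (mid - 1)
  else lo
termination_by (hi - lo).toNat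
decreasing_by
  all_goals
    have h2 : lo + 1 ≤ hi := by omega
    have hb := PySem.Int.floordiv_two_mid_bounds h2
    have he : lo + 1 + hi = lo + hi + 1 := by ring
    rw [he] at hb
    omega

-- B's for-loop over the gaps between consecutive common stones (and the final gap up to M)
def pvSegLoop (M : Int) : List Int → Int → Int → Int → Int
  | [], _prev, _total, count => count
  | c :: rest, prev, total, count =>
    let a := prev + 1
    let len := c - a
    if 0 < len then
      let t := pvBSearch a (M - total) 0 len
      if t < len then count + t
      else pvSegLoop M rest c (total + pvCost a t) (count + t)
    else pvSegLoop M rest c total count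

def get_unique_stones_to_bring_alt (M : Int) (N : Int) (common_stones : List Int) : Int :=
  -- sorted(set(c for c in common_stones if 1 <= c <= M))
  let cs := PySem.List.sorted
    (PySem.Set.ofList (common_stones.filter (fun c => decide (1 ≤ c) && decide (c ≤ M))))
    (fun x => x) false
  pvSegLoop M (cs ++ [M + 1]) 0 0 0

-- ===== PRECONDITION & SPEC =====
def Spec_get_unique_stones_to_bring (M : Int) (N : Int) (common_stones : List Int) (out : Int) : Prop := out = get_unique_stones_to_bring_alt M N common_stones
instance (M : Int) (N : Int) (common_stones : List Int) (out : Int) : Decidable (Spec_get_unique_stones_to_bring M N common_stones out) := by unfold Spec_get_unique_stones_to_bring; infer_instance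

-- ===== CLAIM (what is proved, stated in full; the proofs are below) =====
def Claim_equal_get_unique_stones_to_bring : Prop := ∀ (M : Int) (N : Int) (common_stones : List Int), Dom_get_unique_stones_to_bring M N common_stones → Spec_get_unique_stones_to_bring M N common_stones (get_unique_stones_to_bring M N common_stones)

-- ===== LEMMAS AND PROOFS =====

theorem pvCost_double (a t : Int) : 2 * pvCost a t = 2 * (t * a) + t * (t - 1) := by
  have hev : (2 : Int) ∣ t * (t - 1) := by
    rcases Int.even_mul_succ_self (t - 1) with ⟨k, hk⟩
    exact ⟨k, by linarith [hk]⟩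
  rw [pvCost, PySem.Int.floordiv_eq_ediv_of_pos (by norm_num)]
  obtain ⟨k, hk⟩ := hev
  rw [hk]
  rw [Int.mul_ediv_cancel_left _ (by norm_num : (2:Int) ≠ 0)]
  ring

theorem pvCost_zero (a : Int) : pvCost a 0 = 0 := by
  have h := pvCost_double a 0
  omega

theorem pvCost_succ (a t : Int) : pvCost a (t + 1) = pvCost a t + a + t := by
  have h1 := pvCost_double a (t + 1)
  have h2 := pvCost_double a t
  have e : 2 * ((t + 1) * a) + (t + 1) * (t + 1 - 1) = 2 * (t * a) + t * (t - 1) + 2 * a + 2 * t := by ring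
  linarith [h1, h2, e]

theorem pvCost_shift (a t : Int) : pvCost a (t + 1) = a + pvCost (a + 1) t := by
  have h1 := pvCost_double a (t + 1)
  have h2 := pvCost_double (a + 1) t
  have e : 2 * ((t + 1) * a) + (t + 1) * (t + 1 - 1) = 2 * a + (2 * (t * (a + 1)) + t * (t - 1)) := by ring
  linarith [h1, h2, e]

theorem pvCost_mono (a : Int) (ha : 1 ≤ a) {s t : Int} (hs : 0 ≤ s) (hst : s ≤ t) :
    pvCost a s ≤ pvCost a t := by
  have h1 := pvCost_double a s
  have h2 := pvCost_double a t
  nlinarith [mul_nonneg (by omega : (0:Int) ≤ t - s) (by omega : (0:Int) ≤ 2 * a + t + s - 1)]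

theorem pvCost_one (a : Int) : pvCost a 1 = a := by
  have h := pvCost_succ a 0
  rw [pvCost_zero] at h
  norm_num at h
  exact h

theorem pvBSearch_spec (a budget len : Int) : ∀ (n : Nat) (lo hi : Int), (hi - lo).toNat = n →
    0 ≤ lo → lo ≤ hi → hi ≤ len →
    (lo = 0 ∨ pvCost a lo ≤ budget) → (hi = len ∨ budget < pvCost a (hi + 1)) →
    0 ≤ pvBSearch a budget lo hi ∧ pvBSearch a budget lo hi ≤ len ∧
      (pvBSearch a budget lo hi = 0 ∨ pvCost a (pvBSearch a budget lo hi) ≤ budget) ∧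
      (pvBSearch a budget lo hi = len ∨ budget < pvCost a (pvBSearch a budget lo hi + 1)) := by
  intro n
  induction n using Nat.strong_induction_on with
  | _ n ih =>
    intro lo hi hn h0 hlh hhl hclo hchi
    rw [pvBSearch]
    by_cases h : lo < hi
    · rw [dif_pos h]
      have h2 : lo + 1 ≤ hi := by omega
      have hb := PySem.Int.floordiv_two_mid_bounds h2
      have he : lo + 1 + hi = lo + hi + 1 := by ring
      rw [he] at hb
      set mid := PySem.Int.floordiv (lo + hi + 1) 2 with hmid
      by_cases hc : pvCost a mid ≤ budget
      · rw [if_pos hc]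
        exact ih ((hi - mid).toNat) (by omega) mid hi rfl (by omega) (by omega) hhl
          (Or.inr hc) hchi
      · rw [if_neg hc]
        exact ih ((mid - 1 - lo).toNat) (by omega) lo (mid - 1) rfl h0 (by omega) (by omega)
          hclo (Or.inr (by simpa using not_le.mp hc))
    · rw [dif_neg h]
      have : lo = hi := by omega
      subst this
      exact ⟨h0, hhl, hclo, hchi⟩

theorem pvALoop_run (M : Int) : ∀ (len : Nat) (a total count t : Int) (rest : List Int),
    1 ≤ a → 0 ≤ t → t ≤ (len : Int) →
    (t = 0 ∨ total + pvCost a t ≤ M) → (t = (len : Int) ∨ M < total + pvCost a (t + 1)) →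
    pvALoop M (PySem.List.pyRange a (a + (len : Int)) 1 ++ rest) total count =
      if t < (len : Int) then count + t
      else pvALoop M rest (total + pvCost a t) (count + t) := by
  intro len
  induction len with
  | zero =>
    intro a total count t rest ha ht0 htl _ _
    have ht : t = 0 := by omega
    subst ht
    rw [PySem.List.pyRange_one_eq_nil (by omega)]
    simp [pvCost_zero]
  | succ len ih =>
    intro a total count t rest ha ht0 htl hc1 hc2
    rw [PySem.List.pyRange_one_cons (by push_cast; omega)]
    rw [List.cons_append]
    rw [pvALoop]
    by_cases hM : total + a ≤ M
    · rw [if_pos hM]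
      have ht1 : 1 ≤ t := by
        by_contra hlt
        have ht : t = 0 := by omega
        subst ht
        rcases hc2 with h | h
        · push_cast at h; omega
        · rw [zero_add, pvCost_one] at h; omega
      have hshift : pvCost a t = a + pvCost (a + 1) (t - 1) := by
        have := pvCost_shift a (t - 1)
        simpa [sub_add_cancel] using this
      have hc1' : t - 1 = 0 ∨ (total + a) + pvCost (a + 1) (t - 1) ≤ M := by
        rcases hc1 with h | h
        · omega
        · right; omega
      have hc2' : t - 1 = (len : Int) ∨ M < (total + a) + pvCost (a + 1) ((t - 1) + 1) := by
        rcases hc2 with h | h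
        · left; push_cast at h; omega
        · right
          have hs : pvCost a (t + 1) = a + pvCost (a + 1) t := pvCost_shift a t
          have : (t - 1) + 1 = t := by ring
          rw [this]
          omega
      have harg : a + ((len : Int) + 1) = (a + 1) + (len : Int) := by ring
      push_cast
      rw [harg]
      rw [ih (a + 1) (total + a) (count + 1) (t - 1) rest (by omega) (by omega) (by push_cast at htl ⊢; omega) hc1' hc2']
      have e1 : (count + 1) + (t - 1) = count + t := by ring
      by_cases hlt : t - 1 < (len : Int)
      · rw [if_pos hlt, if_pos (by omega)]
        omega
      · rw [if_neg hlt, if_neg (by omega)]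
        rw [e1]
        congr 1
        omega
    · rw [if_neg hM]
      have ht : t = 0 := by
        by_contra hne
        have h1 : 1 ≤ t := by omega
        rcases hc1 with h | h
        · omega
        · have := pvCost_mono a ha (by norm_num : (0:Int) ≤ 1) h1
          rw [pvCost_one] at this
          omega
      subst ht
      rw [if_pos (by push_cast; omega)]
      omega

theorem pvSegLoop_eq (M : Int) : ∀ (cs : List Int) (prev total count : Int),
    0 ≤ prev → cs.Pairwise (· < ·) → (∀ x ∈ cs, prev < x ∧ x ≤ M) →
    pvALoop M ((PySem.List.pyRange (prev + 1) (M + 1) 1).filter (fun x => !(cs.contains x))) total count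
      = pvSegLoop M (cs ++ [M + 1]) prev total count := by
  intro cs
  induction cs with
  | nil =>
    intro prev total count hprev _ _
    simp only [List.nil_append]
    rw [pvSegLoop]
    simp only [List.contains, List.elem_nil, Bool.not_false, List.filter_true]
    by_cases hlen : 0 < M + 1 - (prev + 1)
    · rw [if_pos hlen]
      set lenN := (M - prev).toNat with hlenN
      have hcast : (lenN : Int) = M - prev := by omega
      have hr := pvBSearch_spec (prev + 1) (M - total) (M + 1 - (prev + 1))
        ((M + 1 - (prev + 1)).toNat) 0 (M + 1 - (prev + 1)) (by omega) le_rfl (by omega) le_rfl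
        (Or.inl rfl) (Or.inl rfl)
      set r := pvBSearch (prev + 1) (M - total) 0 (M + 1 - (prev + 1)) with hrdef
      obtain ⟨hr0, hrl, hrc1, hrc2⟩ := hr
      have hrange : PySem.List.pyRange (prev + 1) (M + 1) 1 =
          PySem.List.pyRange (prev + 1) ((prev + 1) + (lenN : Int)) 1 ++ [] := by
        rw [List.append_nil]; congr 1; omega
      rw [hrange]
      rw [pvALoop_run M lenN (prev + 1) total count r [] (by omega) hr0 (by omega)
        (by rcases hrc1 with h | h; exacts [Or.inl h, Or.inr (by omega)])
        (by rcases hrc2 with h | h; exacts [Or.inl (by omega), Or.inr (by omega)])]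
      by_cases hlt : r < M + 1 - (prev + 1)
      · rw [if_pos (by omega), if_pos hlt]
      · rw [if_neg (by omega), if_neg hlt]
        rw [pvSegLoop]
        rfl
    · rw [if_neg hlen]
      rw [PySem.List.pyRange_one_eq_nil (by omega)]
      rw [pvSegLoop]
      rfl
  | cons c rest ih =>
    intro prev total count hprev hpw hmem
    obtain ⟨hcl, hcu⟩ := hmem c (by simp)
    have hrest_gt : ∀ x ∈ rest, c < x := by
      intro x hx
      exact (List.pairwise_cons.mp hpw).1 x hx
    -- split the range at c
    rw [PySem.List.pyRange_one_append (prev + 1) c (M + 1) (by omega) (by omega)]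
    rw [PySem.List.pyRange_one_cons (by omega : c < M + 1)]
    rw [List.filter_append, List.filter_cons]
    have hcmem : ((c :: rest).contains c) = true := by simp
    simp only [hcmem, Bool.not_true, Bool.false_eq_true, if_false]
    have hleft : (PySem.List.pyRange (prev + 1) c 1).filter (fun x => !((c :: rest).contains x))
        = PySem.List.pyRange (prev + 1) c 1 := by
      apply List.filter_eq_self.mpr
      intro x hx
      have hxlt : x < c := (PySem.List.mem_pyRange_one.mp hx).2
      simp only [List.contains_cons, Bool.not_or, Bool.and_eq_true, Bool.not_eq_true']
      constructor
      · simp [show x ≠ c by omega]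
      · simp only [List.contains_eq_mem, decide_eq_false_iff_not]
        intro hxr
        exact absurd (hrest_gt x hxr) (by omega)
    have hright : (PySem.List.pyRange (c + 1) (M + 1) 1).filter (fun x => !((c :: rest).contains x))
        = (PySem.List.pyRange (c + 1) (M + 1) 1).filter (fun x => !(rest.contains x)) := by
      apply List.filter_congr
      intro x hx
      have hxgt : c < x := by
        have := (PySem.List.mem_pyRange_one.mp hx).1; omega
      simp [show x ≠ c by omega]
    rw [hleft, hright]
    -- B side
    rw [List.cons_append, pvSegLoop]
    have hihyp : ∀ x ∈ rest, c < x ∧ x ≤ M := fun x hx =>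
      ⟨hrest_gt x hx, (hmem x (by simp [hx])).2⟩
    by_cases hlen : 0 < c - (prev + 1)
    · rw [if_pos hlen]
      set lenN := (c - (prev + 1)).toNat with hlenN
      have hr := pvBSearch_spec (prev + 1) (M - total) (c - (prev + 1))
        ((c - (prev + 1)).toNat) 0 (c - (prev + 1)) (by omega) le_rfl (by omega) le_rfl
        (Or.inl rfl) (Or.inl rfl)
      set r := pvBSearch (prev + 1) (M - total) 0 (c - (prev + 1)) with hrdef
      obtain ⟨hr0, hrl, hrc1, hrc2⟩ := hr
      have hrange : PySem.List.pyRange (prev + 1) c 1 =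
          PySem.List.pyRange (prev + 1) ((prev + 1) + (lenN : Int)) 1 := by
        congr 1; omega
      rw [hrange]
      rw [pvALoop_run M lenN (prev + 1) total count r _ (by omega) hr0 (by omega)
        (by rcases hrc1 with h | h; exacts [Or.inl h, Or.inr (by omega)])
        (by rcases hrc2 with h | h; exacts [Or.inl (by omega), Or.inr (by omega)])]
      by_cases hlt : r < c - (prev + 1)
      · rw [if_pos (by omega), if_pos hlt]
      · rw [if_neg (by omega), if_neg hlt]
        exact ih c (total + pvCost (prev + 1) r) (count + r) (by omega)
          (List.pairwise_cons.mp hpw).2 hihyp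
    · rw [if_neg hlen]
      have : PySem.List.pyRange (prev + 1) c 1 = [] :=
        PySem.List.pyRange_one_eq_nil (by omega)
      rw [this, List.nil_append]
      exact ih c total count (by omega) (List.pairwise_cons.mp hpw).2 hihyp

-- ===== VERDICT (by name: the statement is the Claim_ definition above) =====
theorem get_unique_stones_to_bring_spec : Claim_equal_get_unique_stones_to_bring := by
  intro M N common_stones _
  show get_unique_stones_to_bring M N common_stones = get_unique_stones_to_bring_alt M N common_stones
  rw [get_unique_stones_to_bring, get_unique_stones_to_bring_alt]
  set cs := PySem.List.sorted
    (PySem.Set.ofList (common_stones.filter (fun c => decide (1 ≤ c) && decide (c ≤ M))))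
    (fun x => x) false with hcs
  have hmemcs : ∀ x, x ∈ cs ↔ (x ∈ common_stones ∧ 1 ≤ x ∧ x ≤ M) := by
    intro x
    rw [hcs, PySem.List.mem_sorted, PySem.Set.mem_ofList, List.mem_filter]
    simp
  have hpw : cs.Pairwise (· < ·) := PySem.List.sorted_ofList_pairwise_lt _
  -- A's sorted set-difference is the filtered range
  have hdiff : PySem.Set.diff (PySem.List.pyRange 1 (M + 1) 1) (PySem.Set.ofList common_stones)
      = (PySem.List.pyRange 1 (M + 1) 1).filter
          (fun x => !((PySem.Set.ofList common_stones).contains x)) := rfl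
  have hsorted : ((PySem.List.pyRange 1 (M + 1) 1).filter
        (fun x => !((PySem.Set.ofList common_stones).contains x))).mergeSort (fun a b => decide (a ≤ b))
      = (PySem.List.pyRange 1 (M + 1) 1).filter
          (fun x => !((PySem.Set.ofList common_stones).contains x)) := by
    exact List.mergeSort_eq_self (· ≤ ·)
      (((PySem.List.pairwise_lt_pyRange_one 1 (M + 1)).filter _).imp le_of_lt)
  have hpred : (PySem.List.pyRange 1 (M + 1) 1).filter
        (fun x => !((PySem.Set.ofList common_stones).contains x))
      = (PySem.List.pyRange 1 (M + 1) 1).filter (fun x => !(cs.contains x)) := by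
    apply List.filter_congr
    intro x hx
    have hxr := PySem.List.mem_pyRange_one.mp hx
    have h1 : x ∈ cs ↔ x ∈ common_stones :=
      (hmemcs x).trans ⟨fun h => h.1, fun h => ⟨h, by omega, by omega⟩⟩
    simp [PySem.Set.contains, h1]
  rw [hdiff, hsorted, hpred]
  have main := pvSegLoop_eq M cs 0 0 0 le_rfl hpw (fun x hx => by
    have := (hmemcs x).mp hx; omega)
  simpa using main
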